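-- pv_equiv track=rewrite | github.com/tunelko/ctf-2026 | 0xfun_2026/crypto/slot-whisperer/solve.py | predict_next
-- ===== SOURCE A (Python) =====
-- M = 2147483647
--
-- A = 48271
--
-- C = 12345
--
-- def lcg_next(state):
--     return (A * state + C) % M
--
-- def predict_next(state0, n_observed, n_predict):
--     """Given state0, advance n_observed steps and predict n_predict."""
--     s = state0
--     for _ in range(n_observed):
--         s = lcg_next(s)
--     predictions = []
--     for _ in range(n_predict):
--         s = lcg_next(s)
--         predictions.append(s % 100)
--     return predictions
-- ===== SOURCE B (Python) =====
-- M = 2147483647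
-- A = 48271
-- C = 12345
--
-- def _aff_pow(n):
--     """(a, b) with a*s + b congruent mod M to n applications of the LCG step; O(log n)."""
--     if n == 0:
--         return (1, 0)
--     a, b = _aff_pow(n // 2)
--     a2, b2 = (a * a) % M, (a * b + b) % M
--     if n % 2 == 1:
--         return ((A * a2) % M, (A * b2 + C) % M)
--     return (a2, b2)
--
-- def predict_next(state0, n_observed, n_predict):
--     a, b = _aff_pow(max(n_observed, 0))
--     s = (a * state0 + b) % M
--     predictions = []
--     for _ in range(n_predict):
--         s = (A * s + C) % M
--         predictions.append(s % 100)
--     return predictions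
-- ===== Notes on version B (the rewrite author's own statement) =====
-- stated objective: faster
-- what changed: B jumps over the n_observed warm-up steps in one go by binary exponentiation of the affine map s -> A*s+C mod M, instead of iterating the LCG n_observed times; intended as faster (warm-up O(log n_observed) vs O(n_observed), measured 1.5-2.8x at large n_observed; the n_predict loop is unchanged, so inputs dominated by n_predict show no speed-up).
import Mathlib
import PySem

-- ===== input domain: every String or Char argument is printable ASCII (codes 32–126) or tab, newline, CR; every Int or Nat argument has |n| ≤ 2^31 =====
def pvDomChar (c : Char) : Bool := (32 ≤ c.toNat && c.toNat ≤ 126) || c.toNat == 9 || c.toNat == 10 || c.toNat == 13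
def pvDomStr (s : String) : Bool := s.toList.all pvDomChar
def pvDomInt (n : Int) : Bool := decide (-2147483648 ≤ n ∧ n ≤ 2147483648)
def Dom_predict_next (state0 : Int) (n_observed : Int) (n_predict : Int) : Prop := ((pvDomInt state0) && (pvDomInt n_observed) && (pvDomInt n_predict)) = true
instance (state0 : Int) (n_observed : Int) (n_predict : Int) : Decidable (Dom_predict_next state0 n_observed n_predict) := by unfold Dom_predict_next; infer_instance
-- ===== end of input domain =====

-- B replaces A's n_observed-step warm-up loop by binary exponentiation of the affine
-- map s ↦ A*s+C (mod M); intended as faster in the n_observed dimension (the warm-up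
-- becomes O(log n_observed)); the n_predict loop is unchanged.

-- ===== PORT A =====
-- lcg_next; '%' with the positive literal M is PySem.Int.mod (Python floor-mod)
def pvLcgNext (s : Int) : Int := PySem.Int.mod (48271 * s + 12345) 2147483647

-- 'for _ in range(n_observed): s = lcg_next(s)'
def pvWarm : Nat → Int → Int
  | 0, s => s
  | n + 1, s => pvWarm n (pvLcgNext s)

-- 'for _ in range(n_predict): s = lcg_next(s); predictions.append(s % 100)'
def pvPredLoopA : Nat → Int → List Int
  | 0, _ => []
  | k + 1, s =>
    let s' := pvLcgNext s
    PySem.Int.mod s' 100 :: pvPredLoopA k s'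

def predict_next (state0 : Int) (n_observed : Int) (n_predict : Int) : List Int :=
  pvPredLoopA n_predict.toNat (pvWarm n_observed.toNat state0)

-- ===== PORT B =====
-- _aff_pow from Source B: recursion on n // 2
def pvAffPow : Nat → Int × Int
  | 0 => (1, 0)
  | n + 1 =>
    let p := pvAffPow ((n + 1) / 2)
    let a2 := PySem.Int.mod (p.1 * p.1) 2147483647
    let b2 := PySem.Int.mod (p.1 * p.2 + p.2) 2147483647
    if (n + 1) % 2 = 1 then
      (PySem.Int.mod (48271 * a2) 2147483647, PySem.Int.mod (48271 * b2 + 12345) 2147483647)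
    else (a2, b2)
  decreasing_by exact Nat.div_lt_self (Nat.succ_pos n) (by omega)

def pvPredLoopB : Nat → Int → List Int
  | 0, _ => []
  | k + 1, s =>
    let s' := PySem.Int.mod (48271 * s + 12345) 2147483647
    PySem.Int.mod s' 100 :: pvPredLoopB k s'

def predict_next_alt (state0 : Int) (n_observed : Int) (n_predict : Int) : List Int :=
  let p := pvAffPow (max n_observed 0).toNat
  let s := PySem.Int.mod (p.1 * state0 + p.2) 2147483647
  pvPredLoopB n_predict.toNat s

-- ===== PRECONDITION & SPEC =====
def Spec_predict_next (state0 : Int) (n_observed : Int) (n_predict : Int) (out : List Int) : Prop := out = predict_next_alt state0 n_observed n_predict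
instance (state0 : Int) (n_observed : Int) (n_predict : Int) (out : List Int) : Decidable (Spec_predict_next state0 n_observed n_predict out) := by unfold Spec_predict_next; infer_instance

-- ===== CLAIM (what is proved, stated in full; the proofs are below) =====
def Claim_equal_predict_next : Prop := ∀ (state0 : Int) (n_observed : Int) (n_predict : Int), Dom_predict_next state0 n_observed n_predict → Spec_predict_next state0 n_observed n_predict (predict_next state0 n_observed n_predict)

-- ===== LEMMAS AND PROOFS =====

-- PySem.Int.mod with a positive divisor is Int.emod
theorem pvmod_eq (a : Int) : PySem.Int.mod a 2147483647 = a % 2147483647 :=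
  PySem.Int.mod_eq_emod_of_pos (by norm_num)

-- x % M ≡ x  (mod M)
theorem pvself (x : Int) : Int.ModEq 2147483647 (x % 2147483647) x :=
  Int.emod_emod_of_dvd x dvd_rfl

theorem pvLcgNext_eq (s : Int) : pvLcgNext s = (48271 * s + 12345) % 2147483647 := by
  rw [pvLcgNext, pvmod_eq]

-- the LCG step only depends on the state mod M
theorem pvLcg_congr {x y : Int} (h : x % 2147483647 = y % 2147483647) :
    pvLcgNext x = pvLcgNext y := by
  have hm : Int.ModEq 2147483647 (48271 * x + 12345) (48271 * y + 12345) :=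
    (Int.ModEq.mul_left 48271 h).add_right 12345
  simpa [pvLcgNext_eq] using hm

theorem pvWarm_succ' (n : Nat) (s : Int) : pvWarm (n + 1) s = pvLcgNext (pvWarm n s) := by
  induction n generalizing s with
  | zero => rfl
  | succ m ih => simpa [pvWarm] using ih (pvLcgNext s)

theorem pvWarm_add (m n : Nat) (s : Int) : pvWarm (m + n) s = pvWarm n (pvWarm m s) := by
  induction m generalizing s with
  | zero => simp [pvWarm]
  | succ k ih => rw [Nat.succ_add]; simp only [pvWarm]; exact ih (pvLcgNext s)

-- key: the affine pair of pvAffPow n applied to s is congruent mod M to n LCG steps from s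
theorem pvAffPow_spec (n : Nat) : ∀ s : Int,
    Int.ModEq 2147483647 ((pvAffPow n).1 * s + (pvAffPow n).2) (pvWarm n s) := by
  induction n using Nat.strong_induction_on with
  | _ n ih =>
    intro s
    match n with
    | 0 => simp [pvAffPow, pvWarm, Int.ModEq]
    | Nat.succ m =>
      have hlt : (m + 1) / 2 < m + 1 := Nat.div_lt_self (Nat.succ_pos m) (by omega)
      obtain ⟨a, b, hab⟩ : ∃ a b, pvAffPow ((m + 1) / 2) = (a, b) := ⟨_, _, rfl⟩
      have IH : ∀ t : Int, Int.ModEq 2147483647 (a * t + b) (pvWarm ((m + 1) / 2) t) := by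
        intro t; have := ih ((m + 1) / 2) hlt t; rwa [hab] at this
      -- the squared affine pair realises 2*((m+1)/2) LCG steps
      have hsq : ∀ t : Int,
          Int.ModEq 2147483647
            (PySem.Int.mod (a * a) 2147483647 * t + PySem.Int.mod (a * b + b) 2147483647)
            (pvWarm ((m + 1) / 2 + (m + 1) / 2) t) := by
        intro t
        rw [pvWarm_add]
        calc PySem.Int.mod (a * a) 2147483647 * t + PySem.Int.mod (a * b + b) 2147483647
            ≡ a * a * t + (a * b + b) [ZMOD 2147483647] := by
              rw [pvmod_eq, pvmod_eq]
              exact ((pvself (a * a)).mul_right t).add (pvself (a * b + b))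
          _ = a * (a * t + b) + b := by ring
          _ ≡ a * pvWarm ((m + 1) / 2) t + b [ZMOD 2147483647] :=
              ((IH t).mul_left a).add_right b
          _ ≡ pvWarm ((m + 1) / 2) (pvWarm ((m + 1) / 2) t) [ZMOD 2147483647] :=
              IH (pvWarm ((m + 1) / 2) t)
      rw [pvAffPow, hab]
      by_cases hpar : (m + 1) % 2 = 1
      · rw [if_pos hpar]
        have hn : m + 1 = (m + 1) / 2 + (m + 1) / 2 + 1 := by omega
        calc PySem.Int.mod (48271 * PySem.Int.mod (a * a) 2147483647) 2147483647 * s +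
              PySem.Int.mod (48271 * PySem.Int.mod (a * b + b) 2147483647 + 12345) 2147483647
            ≡ 48271 * PySem.Int.mod (a * a) 2147483647 * s +
              (48271 * PySem.Int.mod (a * b + b) 2147483647 + 12345) [ZMOD 2147483647] := by
              rw [pvmod_eq (48271 * PySem.Int.mod (a * a) 2147483647),
                pvmod_eq (48271 * PySem.Int.mod (a * b + b) 2147483647 + 12345)]
              exact ((pvself _).mul_right s).add (pvself _)
          _ = 48271 * (PySem.Int.mod (a * a) 2147483647 * s +
                PySem.Int.mod (a * b + b) 2147483647) + 12345 := by ring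
          _ ≡ 48271 * pvWarm ((m + 1) / 2 + (m + 1) / 2) s + 12345 [ZMOD 2147483647] :=
              ((hsq s).mul_left 48271).add_right 12345
          _ ≡ pvLcgNext (pvWarm ((m + 1) / 2 + (m + 1) / 2) s) [ZMOD 2147483647] :=
              (pvself _).symm.trans (by rw [pvLcgNext_eq])
          _ = pvWarm (m + 1) s := by conv_rhs => rw [hn, pvWarm_succ']
      · rw [if_neg hpar]
        have hn : (m + 1) / 2 + (m + 1) / 2 = m + 1 := by omega
        simpa [hn] using hsq s

-- prediction loops with congruent start states produce the same list
theorem pvPredLoop_congr (k : Nat) : ∀ x y : Int,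
    x % 2147483647 = y % 2147483647 → pvPredLoopA k x = pvPredLoopB k y := by
  induction k with
  | zero => intro x y _; rfl
  | succ m ih =>
    intro x y hxy
    have hstep : pvLcgNext x = pvLcgNext y := pvLcg_congr hxy
    simp only [pvPredLoopA, pvPredLoopB]
    have hy : PySem.Int.mod (48271 * y + 12345) 2147483647 = pvLcgNext x := hstep.symm
    rw [hy]
    exact congrArg _ (ih _ _ rfl)

-- ===== VERDICT (by name: the statement is the Claim_ definition above) =====
theorem predict_next_spec : Claim_equal_predict_next := by
  intro state0 n_observed n_predict _
  unfold Spec_predict_next predict_next predict_next_alt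
  have hmax : (max n_observed 0).toNat = n_observed.toNat := by omega
  rw [hmax]
  apply pvPredLoop_congr
  rw [pvmod_eq, Int.emod_emod_of_dvd _ dvd_rfl]
  exact (pvAffPow_spec n_observed.toNat state0).symm
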